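-- pv_equiv track=rewrite | github.com/sanjeev1779/codechef | salg01.py | sep
-- ===== SOURCE A (Python) =====
-- def sep(s):
--     a=[]
--     b=''
--     for i in list(s):
--         if(i==' ' or i=='\n'):
--             a.append(int(b))
--             b=''
--         b=b+i
--     return(a)
-- ===== SOURCE B (Python) =====
-- def sep(s):
--     parts = s.replace('\n', ' ').split(' ')
--     return [int(t) for t in parts[:-1]]
-- ===== Notes on version B (the rewrite author's own statement) =====
-- stated objective: idiomatic
-- what changed: Replaces A's character-by-character accumulator loop with tokenize-then-convert: replace newlines by spaces, split on spaces with the C-level str.split, and int() every piece except the trailing one (A only appends at separators, so the text after the last separator is never converted).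
import Mathlib
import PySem

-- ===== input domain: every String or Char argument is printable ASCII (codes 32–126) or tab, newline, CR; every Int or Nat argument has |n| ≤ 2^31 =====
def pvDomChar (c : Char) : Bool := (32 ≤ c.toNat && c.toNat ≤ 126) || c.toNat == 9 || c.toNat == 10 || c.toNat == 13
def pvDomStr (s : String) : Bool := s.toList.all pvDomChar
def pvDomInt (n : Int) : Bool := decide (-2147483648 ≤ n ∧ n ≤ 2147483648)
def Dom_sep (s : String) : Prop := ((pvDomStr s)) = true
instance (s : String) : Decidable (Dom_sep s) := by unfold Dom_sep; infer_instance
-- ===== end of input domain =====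

-- B replaces A's character-by-character accumulation with an idiomatic tokenize-then-convert
-- (replace newlines by spaces, split on spaces, int() each piece except the trailing one).

-- ===== PORT A =====
-- state: (a, b) as in the Python; on a separator, append int(b) and reset b, then b = b + i
def sepLoop : List Int → List Char → List Char → List Int
  | a, _, [] => a
  | a, b, i :: rest =>
    if i = ' ' ∨ i = '\n' then
      sepLoop (a ++ [(PySem.Int.ofChars? b).getD 0]) [i] rest
    else
      sepLoop a (b ++ [i]) rest

def sep (s : String) : List Int := sepLoop [] [] s.toList

-- ===== PORT B =====
def sep_alt (s : String) : List Int :=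
  let parts := PySem.Chars.splitOn (PySem.Chars.replace s.toList ['\n'] [' ']) [' ']
  (PySem.List.slice parts none (some (-1))).map (fun t => (PySem.Int.ofChars? t).getD 0)

-- ===== PRECONDITION & SPEC =====
-- helper for Pre_ only: the pieces of s between the separator characters ' ' and '\n'
def splitSep : List Char → List (List Char)
  | [] => [[]]
  | c :: cs =>
    if c = ' ' ∨ c = '\n' then [] :: splitSep cs
    else
      match splitSep cs with
      | [] => [[c]]
      | p :: ps => (c :: p) :: ps

-- Pre_ excludes exactly the inputs where Python's int() raises ValueError in A (and in B):
-- some piece strictly before the last one is not a valid integer literal.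
def Pre_sep (s : String) : Prop :=
  ∀ t ∈ (splitSep s.toList).dropLast, (PySem.Int.ofChars? t).isSome = true
instance (s : String) : Decidable (Pre_sep s) := by unfold Pre_sep; infer_instance

def pvWitness_sep : String := "12 -34\n5 "

def Spec_sep (s : String) (out : List Int) : Prop := out = sep_alt s
instance (s : String) (out : List Int) : Decidable (Spec_sep s out) := by unfold Spec_sep; infer_instance

-- ===== CLAIM (what is proved, stated in full; the proofs are below) =====
def Claim_equal_sep : Prop := ∀ (s : String), Dom_sep s → Pre_sep s → Spec_sep s (sep s)

-- ===== LEMMAS AND PROOFS =====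

-- int() ignores a leading whitespace character
theorem ofChars?_ws_cons (c : Char) (t : List Char) (h : PySem.Int.isIntSpace c = true) :
    PySem.Int.ofChars? (c :: t) = PySem.Int.ofChars? t := by
  simp [PySem.Int.ofChars?, h]

def subNl (c : Char) : Char := if c = '\n' then ' ' else c

theorem replace_go_single (fuel : Nat) :
    ∀ (l acc : List Char), l.length ≤ fuel →
      PySem.Chars.replace.go ['\n'] [' '] fuel l acc = acc.reverse ++ l.map subNl := by
  induction fuel with
  | zero =>
    intro l acc h
    have : l = [] := List.eq_nil_of_length_eq_zero (Nat.le_zero.mp h)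
    subst this; simp [PySem.Chars.replace.go]
  | succ f ih =>
    intro l acc h
    cases l with
    | nil => simp [PySem.Chars.replace.go]
    | cons c t =>
      simp only [PySem.Chars.replace.go]
      split
      next hpre =>
        have hc : c = '\n' := by
          simp [List.isPrefixOf] at hpre
          exact hpre.symm
        subst hc
        simp only [List.length_singleton, List.drop_succ_cons, List.drop_zero]
        rw [ih t _ (by simpa using h)]
        simp [subNl]
      next hpre =>
        have hc : c ≠ '\n' := by
          intro hc; subst hc; exact hpre (by simp [List.isPrefixOf])
        rw [ih t _ (by simpa using h)]
        simp [subNl, hc]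

theorem replace_nl (cs : List Char) :
    PySem.Chars.replace cs ['\n'] [' '] = cs.map subNl := by
  simp only [PySem.Chars.replace, List.isEmpty]
  rw [if_neg (by simp)]
  simpa using replace_go_single cs.length cs [] le_rfl

-- split on the single character ' '
def splitSp : List Char → List (List Char)
  | [] => [[]]
  | c :: cs =>
    if c = ' ' then [] :: splitSp cs
    else
      match splitSp cs with
      | [] => [[c]]
      | p :: ps => (c :: p) :: ps

def prefixFirst (b : List Char) : List (List Char) → List (List Char)
  | [] => [b]
  | p :: ps => (b ++ p) :: ps

theorem prefixFirst_nil_of_ne (xs : List (List Char)) (h : xs ≠ []) : prefixFirst [] xs = xs := by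
  cases xs with
  | nil => exact absurd rfl h
  | cons p ps => simp [prefixFirst]

theorem splitSp_ne_nil (cs : List Char) : splitSp cs ≠ [] := by
  cases cs with
  | nil => simp [splitSp]
  | cons c t =>
    simp only [splitSp]
    split <;> [simp; skip]
    split <;> simp

theorem splitSep_ne_nil (cs : List Char) : splitSep cs ≠ [] := by
  cases cs with
  | nil => simp [splitSep]
  | cons c t =>
    simp only [splitSep]
    split <;> [simp; skip]
    split <;> simp

theorem splitOn_go_single (fuel : Nat) :
    ∀ (l cur : List Char) (acc : List (List Char)), l.length < fuel →
      PySem.Chars.splitOn.go [' '] fuel l cur acc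
        = acc.reverse ++ prefixFirst cur.reverse (splitSp l) := by
  induction fuel with
  | zero => intro l cur acc h; omega
  | succ f ih =>
    intro l cur acc h
    cases l with
    | nil => simp [PySem.Chars.splitOn.go, splitSp, prefixFirst]
    | cons c t =>
      simp only [PySem.Chars.splitOn.go]
      split
      next hpre =>
        have hc : c = ' ' := by
          simp [List.isPrefixOf] at hpre
          exact hpre.symm
        subst hc
        rw [ih _ _ _ (by simpa using h)]
        simp only [splitSp, List.reverse_cons, List.reverse_nil, List.append_assoc,
          List.singleton_append, List.length_cons, List.length_nil,
          List.drop_succ_cons, List.drop_zero]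
        rw [prefixFirst_nil_of_ne _ (splitSp_ne_nil t)]
        simp [prefixFirst]
      next hpre =>
        have hc : c ≠ ' ' := by
          intro hc; subst hc; exact hpre (by simp [List.isPrefixOf])
        rw [ih _ _ _ (by simpa using h)]
        simp only [splitSp, if_neg hc, List.reverse_cons]
        rcases hps : splitSp t with _ | ⟨p, ps⟩
        · exact absurd hps (splitSp_ne_nil t)
        · simp [prefixFirst]

theorem splitOn_single (m : List Char) :
    PySem.Chars.splitOn m [' '] = splitSp m := by
  have := splitOn_go_single (m.length + 1) m [] [] (by omega)
  simp only [PySem.Chars.splitOn] at *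
  rw [this]
  rcases h : splitSp m with _ | ⟨p, ps⟩
  · exact absurd h (splitSp_ne_nil m)
  · simp [prefixFirst]

theorem splitSp_map_subNl (cs : List Char) :
    splitSp (cs.map subNl) = splitSep cs := by
  induction cs with
  | nil => simp [splitSp, splitSep]
  | cons c t ih =>
    by_cases hc : c = ' ' ∨ c = '\n'
    · rcases hc with hc | hc <;> subst hc <;>
        simp [splitSp, splitSep, subNl, ih]
    · have hc' : c ≠ ' ' ∧ c ≠ '\n' := by
        constructor <;> intro h <;> exact hc (by simp [h])
      have h1 : subNl c = c := by simp [subNl, hc'.2]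
      simp only [List.map_cons, h1, splitSp, splitSep, if_neg hc'.1, if_neg hc, ih]

-- loop invariant for A's fold: the buffer b is the pending (partially read) piece
theorem sepLoop_eq (cs : List Char) :
    ∀ (a : List Int) (b : List Char),
      sepLoop a b cs
        = a ++ ((prefixFirst b (splitSep cs)).dropLast).map
            (fun t => (PySem.Int.ofChars? t).getD 0) := by
  induction cs with
  | nil => intro a b; simp [sepLoop, splitSep, prefixFirst]
  | cons c t ih =>
    intro a b
    by_cases hc : c = ' ' ∨ c = '\n'
    · simp only [sepLoop, if_pos hc, ih, splitSep]
      have hws : PySem.Int.isIntSpace c = true := by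
        rcases hc with hc | hc <;> subst hc <;> decide
      rcases hq : splitSep t with _ | ⟨q, qs⟩
      · exact absurd hq (splitSep_ne_nil t)
      · rcases qs with _ | ⟨r, rs⟩
        · simp [prefixFirst]
        · simp [prefixFirst, ofChars?_ws_cons c q hws]
    · simp only [sepLoop, if_neg hc, ih, splitSep]
      rcases hq : splitSep t with _ | ⟨q, qs⟩
      · exact absurd hq (splitSep_ne_nil t)
      · simp [prefixFirst]

theorem sep_eq (s : String) :
    sep s = ((splitSep s.toList).dropLast).map (fun t => (PySem.Int.ofChars? t).getD 0) := by
  rw [sep, sepLoop_eq]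
  rcases h : splitSep s.toList with _ | ⟨p, ps⟩
  · exact absurd h (splitSep_ne_nil s.toList)
  · simp [prefixFirst]

theorem sep_alt_eq (s : String) :
    sep_alt s = ((splitSep s.toList).dropLast).map (fun t => (PySem.Int.ofChars? t).getD 0) := by
  rw [sep_alt]
  simp only [replace_nl, splitOn_single, splitSp_map_subNl, PySem.List.slice_to_neg_one]

-- ===== VERDICT (by name: the statement is the Claim_ definition above) =====
theorem sep_spec : Claim_equal_sep := by
  intro s _ _
  unfold Spec_sep
  rw [sep_eq, sep_alt_eq]
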